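-- pv_equiv track=rewrite | github.com/Hyphern/Rummikub | Rummikub-Carden/testing_files/worm/redundant/backup.py | find_stranded_tiles
-- ===== SOURCE A (Python) =====
-- def get_column(board, col_idx):
--     """Get all values in a column."""
--     return [board[i][col_idx] for i in range(len(board))]
--
-- def can_form_run(board, row_idx, col_idx):
--     """Check if tile can be part of any run."""
--     row = board[row_idx]
--
--     if col_idx >= 2 and row[col_idx-2] > 0 and row[col_idx-1] > 0:
--         return True
--     if col_idx >= 1 and col_idx <= len(row) - 2 and row[col_idx-1] > 0 and row[col_idx+1] > 0:
--         return True
--     if col_idx <= len(row) - 3 and row[col_idx+1] > 0 and row[col_idx+2] > 0: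
--         return True
--
--     return False
--
-- def can_form_group(board, row_idx, col_idx):
--     """Check if tile can be part of any group."""
--     column = get_column(board, col_idx)
--     available = sum(1 for count in column if count > 0)
--     return available >= 3
--
-- def find_stranded_tiles(board):
--     """Find tiles that can only form groups (no run option).
--     Only returns tiles that genuinely cannot participate in any run."""
--     stranded = []
--
--     for row_idx in range(len(board)):
--         for col_idx in range(len(board[row_idx])):
--             if board[row_idx][col_idx] == 0:
--                 continue
--
--             can_run = can_form_run(board, row_idx, col_idx)
--             can_group = can_form_group(board, row_idx, col_idx)
--
--             # Tile can only group, not run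
--             if can_group and not can_run:
--                 stranded.append(('group_only', row_idx, col_idx))
--
--     return stranded
-- ===== SOURCE B (Python) =====
-- def find_stranded_tiles(board):
--     """Find tiles that can only form groups (no run option).
--     One left-to-right / right-to-left run-length scan per row replaces the
--     per-cell three-window probe, and per-column positive counts are
--     precomputed once instead of extracting a column per cell."""
--     ncols = max((len(r) for r in board), default=0)
--     col_count = [sum(1 for r in board if j < len(r) and r[j] > 0)
--                  for j in range(ncols)]
--     result = []
--     for i, row in enumerate(board):
--         m = len(row)
--         left = []          # left[j] = length of positive streak ending at j
--         acc = 0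
--         for v in row:
--             acc = acc + 1 if v > 0 else 0
--             left.append(acc)
--         right = []         # right[j] = length of positive streak starting at j
--         acc = 0
--         for v in reversed(row):
--             acc = acc + 1 if v > 0 else 0
--             right.append(acc)
--         right.reverse()
--         for j, v in enumerate(row):
--             if v == 0:
--                 continue
--             L = left[j - 1] if j >= 1 else 0
--             R = right[j + 1] if j + 1 < m else 0
--             if col_count[j] >= 3 and L + R < 2:
--                 result.append(('group_only', i, j))
--     return result
-- ===== Notes on version B (the rewrite author's own statement) =====
-- stated objective: faster
-- what changed: A single left-to-right/right-to-left positive-streak scan per row plus a precomputed per-column positive-count table replace A's per-cell three-window run probe and per-cell column extraction.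
import Mathlib
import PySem

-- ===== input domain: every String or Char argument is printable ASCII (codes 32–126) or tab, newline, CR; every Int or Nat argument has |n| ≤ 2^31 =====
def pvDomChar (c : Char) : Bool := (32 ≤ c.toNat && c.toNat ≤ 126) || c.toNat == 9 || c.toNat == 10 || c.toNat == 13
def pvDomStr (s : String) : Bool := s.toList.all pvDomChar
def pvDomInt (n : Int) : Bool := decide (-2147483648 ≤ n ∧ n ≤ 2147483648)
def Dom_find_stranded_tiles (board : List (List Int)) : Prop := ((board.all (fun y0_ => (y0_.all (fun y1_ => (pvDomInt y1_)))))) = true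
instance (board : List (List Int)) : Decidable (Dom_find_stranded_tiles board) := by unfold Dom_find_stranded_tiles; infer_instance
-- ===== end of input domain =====

-- B replaces A's per-cell three-window run probe and per-cell column extraction by one
-- run-length scan per row plus a precomputed per-column positive-count table (faster).

-- ===== PORT A =====
def pvGetColumn (board : List (List Int)) (col_idx : Nat) : List Int :=
  (List.range board.length).map (fun i => (board.getD i []).getD col_idx 0)

def pvCanFormRun (board : List (List Int)) (row_idx col_idx : Nat) : Bool :=
  let row := board.getD row_idx []
  if 2 ≤ col_idx ∧ 0 < row.getD (col_idx - 2) 0 ∧ 0 < row.getD (col_idx - 1) 0 then true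
  else if 1 ≤ col_idx ∧ col_idx + 2 ≤ row.length ∧ 0 < row.getD (col_idx - 1) 0 ∧ 0 < row.getD (col_idx + 1) 0 then true
  else if col_idx + 3 ≤ row.length ∧ 0 < row.getD (col_idx + 1) 0 ∧ 0 < row.getD (col_idx + 2) 0 then true
  else false

-- row_idx is kept (unused) because Python's can_form_group takes it
def pvCanFormGroup (board : List (List Int)) (_row_idx col_idx : Nat) : Bool :=
  let column := pvGetColumn board col_idx
  let available := column.countP (fun c => decide (0 < c))
  decide (3 ≤ available)

def find_stranded_tiles (board : List (List Int)) : List (String × Int × Int) :=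
  (List.range board.length).foldl (fun stranded row_idx =>
    (List.range (board.getD row_idx []).length).foldl (fun stranded col_idx =>
      if (board.getD row_idx []).getD col_idx 0 = 0 then stranded
      else
        let can_run := pvCanFormRun board row_idx col_idx
        let can_group := pvCanFormGroup board row_idx col_idx
        if can_group && !can_run then stranded ++ [("group_only", (row_idx : Int), (col_idx : Int))]
        else stranded) stranded) []

-- ===== PORT B =====
-- running streak lengths: out[j] = length of the positive streak ending at j
def pvStreaks : Int → List Int → List Int
  | _, [] => []
  | acc, v :: rest =>
      let a := if 0 < v then acc + 1 else 0
      a :: pvStreaks a rest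

def pvColCounts (board : List (List Int)) : List Int :=
  let ncols := board.foldl (fun m r => max m r.length) 0
  (List.range ncols).map (fun j =>
    (board.countP (fun r => decide (j < r.length) && decide (0 < r.getD j 0)) : Int))

def find_stranded_tiles_alt (board : List (List Int)) : List (String × Int × Int) :=
  let colCount := pvColCounts board
  (PySem.List.enumerate board 0).foldl (fun result p =>
    let i := p.1
    let row := p.2
    let left := pvStreaks 0 row
    let right := (pvStreaks 0 row.reverse).reverse
    (PySem.List.enumerate row 0).foldl (fun result q =>
      let j := q.1
      let v := q.2
      if v = 0 then result
      else
        let L := if 1 ≤ j then PySem.List.pyGetD left (j - 1) 0 else 0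
        let R := if j + 1 < (row.length : Int) then PySem.List.pyGetD right (j + 1) 0 else 0
        if 3 ≤ PySem.List.pyGetD colCount j 0 ∧ L + R < 2 then
          result ++ [("group_only", i, j)]
        else result) result) []

-- ===== PRECONDITION & SPEC =====
-- Pre_ excludes exactly the boards on which Python A raises IndexError: a nonzero cell in
-- some column that a (shorter) row of the board does not possess makes get_column raise.
def Pre_find_stranded_tiles (board : List (List Int)) : Prop :=
  ∀ row ∈ board, ∀ j ∈ List.range row.length,
    row.getD j 0 ≠ 0 → ∀ r2 ∈ board, j < r2.length
instance (board : List (List Int)) : Decidable (Pre_find_stranded_tiles board) := by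
  unfold Pre_find_stranded_tiles; infer_instance

def pvWitness_find_stranded_tiles : List (List Int) := [[1, 1, 0], [1, 0, 2], [-1, 3, 0]]

def Spec_find_stranded_tiles (board : List (List Int)) (out : List (String × Int × Int)) : Prop := out = find_stranded_tiles_alt board
instance (board : List (List Int)) (out : List (String × Int × Int)) : Decidable (Spec_find_stranded_tiles board out) := by unfold Spec_find_stranded_tiles; infer_instance

-- ===== CLAIM (what is proved, stated in full; the proofs are below) =====
def Claim_equal_find_stranded_tiles : Prop := ∀ (board : List (List Int)), Dom_find_stranded_tiles board → Pre_find_stranded_tiles board → Spec_find_stranded_tiles board (find_stranded_tiles board)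

-- ===== LEMMAS AND PROOFS =====

theorem pvStreaks_length (acc : Int) (xs : List Int) : (pvStreaks acc xs).length = xs.length := by
  induction xs generalizing acc with
  | nil => rfl
  | cons v rest ih => simp [pvStreaks, ih]

theorem pvStreaks_mem_nonneg (acc : Int) (xs : List Int) (h : 0 ≤ acc) :
    ∀ x ∈ pvStreaks acc xs, 0 ≤ x := by
  induction xs generalizing acc with
  | nil => simp [pvStreaks]
  | cons v rest ih =>
    intro x hx
    simp only [pvStreaks, List.mem_cons] at hx
    rcases hx with rfl | hx
    · split <;> omega
    · exact ih _ (by split <;> omega) x hx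

theorem getD_nonneg_of_forall (xs : List Int) (k : Nat) (h : ∀ x ∈ xs, 0 ≤ x) :
    0 ≤ xs.getD k 0 := by
  by_cases hk : k < xs.length
  · rw [List.getD_eq_getElem xs 0 hk]; exact h _ (List.getElem_mem hk)
  · rw [List.getD_eq_default xs 0 (by omega)]

theorem pvStreaks_getD_succ (xs : List Int) (acc : Int) (k : Nat) (h : k + 1 < xs.length) :
    (pvStreaks acc xs).getD (k+1) 0
      = if 0 < xs.getD (k+1) 0 then (pvStreaks acc xs).getD k 0 + 1 else 0 := by
  induction xs generalizing acc k with
  | nil => simp at h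
  | cons v rest ih =>
    simp only [pvStreaks]
    cases k with
    | zero =>
      cases rest with
      | nil => simp at h
      | cons w rest' => simp [pvStreaks]
    | succ k' =>
      simp only [List.getD_cons_succ]
      exact ih _ k' (by simpa using h)

theorem pvLeft_ge1 (row : List Int) (k : Nat) (h : k < row.length) :
    1 ≤ (pvStreaks 0 row).getD k 0 ↔ 0 < row.getD k 0 := by
  cases k with
  | zero =>
    cases row with
    | nil => simp at h
    | cons v rest =>
      simp only [pvStreaks, List.getD_cons_zero]
      split <;> omega
  | succ k' =>
    rw [pvStreaks_getD_succ row 0 k' h]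
    have h0 : 0 ≤ (pvStreaks 0 row).getD k' 0 :=
      getD_nonneg_of_forall _ _ (pvStreaks_mem_nonneg 0 row le_rfl)
    split <;> omega

theorem pvLeft_zero_le_one (row : List Int) : (pvStreaks 0 row).getD 0 0 ≤ 1 := by
  cases row with
  | nil => simp [pvStreaks]
  | cons v rest =>
    simp only [pvStreaks, List.getD_cons_zero]
    split <;> omega

theorem pvLeft_ge2 (row : List Int) (k : Nat) (h : k + 1 < row.length) :
    2 ≤ (pvStreaks 0 row).getD (k+1) 0 ↔ (0 < row.getD (k+1) 0 ∧ 0 < row.getD k 0) := by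
  rw [pvStreaks_getD_succ row 0 k h]
  have h1 := pvLeft_ge1 row k (by omega)
  split <;> omega

theorem getD_reverse_int (xs : List Int) (k : Nat) (h : k < xs.length) :
    xs.reverse.getD k 0 = xs.getD (xs.length - 1 - k) 0 := by
  rw [List.getD_eq_getElem xs.reverse 0 (by simpa using h),
      List.getD_eq_getElem xs 0 (by omega)]
  simp [List.getElem_reverse]

theorem pvRight_getD (row : List Int) (k : Nat) (h : k < row.length) :
    ((pvStreaks 0 row.reverse).reverse).getD k 0
      = (pvStreaks 0 row.reverse).getD (row.length - 1 - k) 0 := by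
  have hl : (pvStreaks 0 row.reverse).length = row.length := by
    rw [pvStreaks_length]; simp
  rw [getD_reverse_int _ k (by omega), hl]

theorem pvRight_ge1 (row : List Int) (k : Nat) (h : k < row.length) :
    1 ≤ ((pvStreaks 0 row.reverse).reverse).getD k 0 ↔ 0 < row.getD k 0 := by
  rw [pvRight_getD row k h,
      pvLeft_ge1 row.reverse (row.length - 1 - k) (by simp; omega),
      getD_reverse_int row _ (by omega)]
  have e : row.length - 1 - (row.length - 1 - k) = k := by omega
  rw [e]

theorem pvRight_ge2 (row : List Int) (k : Nat) (h : k < row.length) :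
    2 ≤ ((pvStreaks 0 row.reverse).reverse).getD k 0
      ↔ (0 < row.getD k 0 ∧ k + 1 < row.length ∧ 0 < row.getD (k+1) 0) := by
  rw [pvRight_getD row k h]
  by_cases hk : k + 1 < row.length
  · have hidx : row.length - 1 - k = (row.length - 2 - k) + 1 := by omega
    rw [hidx]
    rw [pvLeft_ge2 row.reverse (row.length - 2 - k) (by simp; omega)]
    rw [← hidx]
    rw [getD_reverse_int row (row.length - 1 - k) (by omega)]
    rw [getD_reverse_int row (row.length - 2 - k) (by omega)]
    have e1 : row.length - 1 - (row.length - 1 - k) = k := by omega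
    have e2 : row.length - 1 - (row.length - 2 - k) = k + 1 := by omega
    rw [e1, e2]
    tauto
  · have hidx : row.length - 1 - k = 0 := by omega
    rw [hidx]
    have := pvLeft_zero_le_one row.reverse
    constructor
    · intro h2; omega
    · rintro ⟨-, h2, -⟩; omega

theorem pvRun_eq (board : List (List Int)) (i j : Nat)
    (h : j < (board.getD i []).length) :
    pvCanFormRun board i j =
      decide (2 ≤ (if 1 ≤ j then (pvStreaks 0 (board.getD i [])).getD (j-1) 0 else 0)
                + (if j + 1 < (board.getD i []).length then
                     ((pvStreaks 0 (board.getD i []).reverse).reverse).getD (j+1) 0 else 0)) := by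
  set row := board.getD i [] with hrow
  set L := (if 1 ≤ j then (pvStreaks 0 row).getD (j-1) 0 else 0) with hL
  set R := (if j + 1 < row.length then ((pvStreaks 0 row.reverse).reverse).getD (j+1) 0 else 0) with hR
  have hnn := pvStreaks_mem_nonneg 0 row le_rfl
  have hL0 : 0 ≤ L := by
    rw [hL]; split
    · exact getD_nonneg_of_forall _ _ hnn
    · exact le_rfl
  have hR0 : 0 ≤ R := by
    rw [hR]; split
    · exact getD_nonneg_of_forall _ _ (by
        intro x hx
        exact pvStreaks_mem_nonneg 0 row.reverse le_rfl x (List.mem_reverse.mp hx))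
    · exact le_rfl
  have hL1 : 1 ≤ L ↔ (1 ≤ j ∧ 0 < row.getD (j-1) 0) := by
    rw [hL]; split
    · rw [pvLeft_ge1 row (j-1) (by omega)]; tauto
    · omega
  have hL2 : 2 ≤ L ↔ (2 ≤ j ∧ 0 < row.getD (j-1) 0 ∧ 0 < row.getD (j-2) 0) := by
    rw [hL]; split
    · rename_i hj1
      match j, hj1 with
      | 1, _ =>
        simp only [show (1:Nat) - 1 = 0 from rfl]
        have := pvLeft_zero_le_one row
        constructor
        · intro; omega
        · rintro ⟨h2, -⟩; omega
      | (k+2), _ =>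
        have e : k + 2 - 1 = k + 1 := by omega
        rw [e, pvLeft_ge2 row k (by omega)]
        have e2 : k + 2 - 2 = k := by omega
        rw [e2]
        constructor
        · rintro ⟨a, b⟩; exact ⟨by omega, a, b⟩
        · rintro ⟨-, a, b⟩; exact ⟨a, b⟩
    · omega
  have hR1 : 1 ≤ R ↔ (j + 1 < row.length ∧ 0 < row.getD (j+1) 0) := by
    rw [hR]; split
    · rw [pvRight_ge1 row (j+1) (by omega)]; tauto
    · omega
  have hR2 : 2 ≤ R ↔ (j + 1 < row.length ∧ 0 < row.getD (j+1) 0 ∧ j + 2 < row.length ∧ 0 < row.getD (j+2) 0) := by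
    rw [hR]; split
    · rw [pvRight_ge2 row (j+1) (by omega)]
      have e : j + 1 + 1 = j + 2 := by omega
      rw [e]; tauto
    · omega
  have key : ((2 ≤ j ∧ 0 < row.getD (j-2) 0 ∧ 0 < row.getD (j-1) 0)
      ∨ (1 ≤ j ∧ j + 2 ≤ row.length ∧ 0 < row.getD (j-1) 0 ∧ 0 < row.getD (j+1) 0)
      ∨ (j + 3 ≤ row.length ∧ 0 < row.getD (j+1) 0 ∧ 0 < row.getD (j+2) 0))
      ↔ 2 ≤ L + R := by
    constructor
    · rintro (⟨a, b, c⟩ | ⟨a, b, c, d⟩ | ⟨a, b, c⟩)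
      · have : 2 ≤ L := hL2.mpr ⟨a, c, b⟩
        omega
      · have h1 : 1 ≤ L := hL1.mpr ⟨by omega, c⟩
        have h2 : 1 ≤ R := hR1.mpr ⟨by omega, d⟩
        omega
      · have : 2 ≤ R := hR2.mpr ⟨by omega, b, by omega, c⟩
        omega
    · intro hle
      by_cases c2 : 2 ≤ L
      · obtain ⟨a, b, c⟩ := hL2.mp c2
        exact Or.inl ⟨a, c, b⟩
      · by_cases c2r : 2 ≤ R
        · obtain ⟨a, b, c, d⟩ := hR2.mp c2r
          exact Or.inr (Or.inr ⟨by omega, b, d⟩)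
        · have h1 : 1 ≤ L := by omega
          have h2 : 1 ≤ R := by omega
          obtain ⟨a, b⟩ := hL1.mp h1
          obtain ⟨c, d⟩ := hR1.mp h2
          exact Or.inr (Or.inl ⟨a, by omega, b, d⟩)
  rw [pvCanFormRun]
  rw [← hrow]
  split_ifs with a b c
  · have := key.mp (Or.inl a); simp [this]
  · have := key.mp (Or.inr (Or.inl b)); simp [this]
  · have := key.mp (Or.inr (Or.inr c)); simp [this]
  · have : ¬ (2 ≤ L + R) := fun hc => (key.mpr hc).elim a (fun h' => h'.elim b c)
    simp [this]

theorem map_getD_range_rows (board : List (List Int)) :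
    (List.range board.length).map (fun i => board.getD i []) = board := by
  apply List.ext_getElem (by simp)
  intro i h1 h2
  simp [List.getElem?_eq_getElem h2]

theorem pvColumn_eq (board : List (List Int)) (j : Nat) :
    pvGetColumn board j = board.map (fun r => r.getD j 0) := by
  unfold pvGetColumn
  rw [show (fun i => (board.getD i []).getD j 0)
        = (fun r => r.getD j 0) ∘ (fun i => board.getD i []) from rfl]
  rw [← List.map_map, map_getD_range_rows]

theorem pvAvail_eq (board : List (List Int)) (j : Nat) :
    (pvGetColumn board j).countP (fun c => decide (0 < c))
      = board.countP (fun r => decide (j < r.length) && decide (0 < r.getD j 0)) := by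
  rw [pvColumn_eq, List.countP_map]
  apply List.countP_congr
  intro r _
  by_cases hr : j < r.length
  · simp [hr]
  · have hd : r.getD j 0 = 0 := List.getD_eq_default r 0 (by omega)
    simp [hr]

theorem pvNcols_ge (board : List (List Int)) (r : List Int) (hr : r ∈ board) :
    r.length ≤ board.foldl (fun m r => max m r.length) 0 :=
  (PySem.List.le_foldl_max_nat board List.length 0).2 r hr

theorem pvColCounts_getD (board : List (List Int)) (j : Nat)
    (hj : ∃ r ∈ board, j < r.length) :
    (pvColCounts board).getD j 0
      = (board.countP (fun r => decide (j < r.length) && decide (0 < r.getD j 0)) : Int) := by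
  obtain ⟨r, hr, hlt⟩ := hj
  have hjn : j < board.foldl (fun m r => max m r.length) 0 :=
    lt_of_lt_of_le hlt (pvNcols_ge board r hr)
  unfold pvColCounts
  rw [List.getD_eq_getElem _ 0 (by simpa using hjn)]
  simp

theorem pvGroup_eq (board : List (List Int)) (i j : Nat)
    (hi : i < board.length) (hj : j < (board.getD i []).length) :
    pvCanFormGroup board i j = decide (3 ≤ (pvColCounts board).getD j 0) := by
  show decide (3 ≤ (pvGetColumn board j).countP (fun c => decide (0 < c)))
        = decide (3 ≤ (pvColCounts board).getD j 0)
  rw [pvAvail_eq]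
  rw [pvColCounts_getD board j ⟨board.getD i [], by
    rw [List.getD_eq_getElem board [] hi]; exact List.getElem_mem hi, hj⟩]
  rw [decide_eq_decide]
  omega

def pvCellA (board : List (List Int)) (i j : Nat) : Bool :=
  decide ((board.getD i []).getD j 0 ≠ 0)
    && (pvCanFormGroup board i j && !pvCanFormRun board i j)

def pvRowA (board : List (List Int)) (i : Nat) : List (String × Int × Int) :=
  ((List.range (board.getD i []).length).filter (pvCellA board i)).map
    (fun (j : Nat) => ("group_only", (i : Int), (j : Int)))

def pvCellB (board : List (List Int)) (row : List Int) (q : Int × Int) : Bool :=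
  decide (q.2 ≠ 0) &&
  decide (3 ≤ PySem.List.pyGetD (pvColCounts board) q.1 0 ∧
    (if 1 ≤ q.1 then PySem.List.pyGetD (pvStreaks 0 row) (q.1 - 1) 0 else 0)
      + (if q.1 + 1 < (row.length : Int) then
           PySem.List.pyGetD ((pvStreaks 0 row.reverse).reverse) (q.1 + 1) 0 else 0) < 2)

def pvRowB (board : List (List Int)) (p : Int × List Int) : List (String × Int × Int) :=
  ((PySem.List.enumerate p.2 0).filter (pvCellB board p.2)).map
    (fun q => ("group_only", p.1, q.1))

theorem pvCell_eq (board : List (List Int)) (i j : Nat)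
    (hi : i < board.length) (hj : j < (board.getD i []).length) :
    pvCellA board i j = pvCellB board (board.getD i []) ((j : Int), (board.getD i []).getD j 0) := by
  unfold pvCellA pvCellB
  rw [pvGroup_eq board i j hi hj, pvRun_eq board i j hj]
  have hcc : PySem.List.pyGetD (pvColCounts board) (j : Int) 0 = (pvColCounts board).getD j 0 :=
    PySem.List.pyGetD_natCast _ _ _
  have hLL : (if 1 ≤ (j : Int) then PySem.List.pyGetD (pvStreaks 0 (board.getD i [])) ((j : Int) - 1) 0 else 0)
      = (if 1 ≤ j then (pvStreaks 0 (board.getD i [])).getD (j - 1) 0 else 0) := by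
    by_cases h1 : 1 ≤ j
    · rw [if_pos (by exact_mod_cast h1), if_pos h1,
        show ((j : Int) - 1) = ((j - 1 : Nat) : Int) by omega, PySem.List.pyGetD_natCast]
    · rw [if_neg (by exact_mod_cast h1), if_neg h1]
  have hRR : (if (j : Int) + 1 < ((board.getD i []).length : Int) then
        PySem.List.pyGetD ((pvStreaks 0 (board.getD i []).reverse).reverse) ((j : Int) + 1) 0 else 0)
      = (if j + 1 < (board.getD i []).length then
        ((pvStreaks 0 (board.getD i []).reverse).reverse).getD (j + 1) 0 else 0) := by
    by_cases h1 : j + 1 < (board.getD i []).length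
    · rw [if_pos (by exact_mod_cast h1), if_pos h1,
        show ((j : Int) + 1) = ((j + 1 : Nat) : Int) by omega, PySem.List.pyGetD_natCast]
    · rw [if_neg (by exact_mod_cast h1), if_neg h1]
  dsimp only
  simp only [hcc, hLL, hRR]
  rcases Bool.eq_false_or_eq_true (decide ((board.getD i []).getD j 0 ≠ 0)) with hz | hz <;>
    rw [hz] <;> simp only [Bool.false_and, Bool.true_and]
  generalize (pvColCounts board).getD j 0 = cc
  generalize ((if 1 ≤ j then (pvStreaks 0 (board.getD i [])).getD (j - 1) 0 else 0)
      + (if j + 1 < (board.getD i []).length then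
          ((pvStreaks 0 (board.getD i []).reverse).reverse).getD (j + 1) 0 else 0)) = S
  by_cases h3 : 3 ≤ cc
  · by_cases h2 : 2 ≤ S
    · simp [h3, h2, show ¬ (S < 2) from by omega]
    · simp [h3, h2, show S < 2 from by omega]
  · simp [h3]

theorem pvA_inner (board : List (List Int)) (i : Nat) (st : List (String × Int × Int)) :
    (List.range (board.getD i []).length).foldl (fun stranded col_idx =>
      if (board.getD i []).getD col_idx 0 = 0 then stranded
      else
        if pvCanFormGroup board i col_idx && !pvCanFormRun board i col_idx then
          stranded ++ [("group_only", (i : Int), (col_idx : Int))]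
        else stranded) st
    = st ++ pvRowA board i := by
  unfold pvRowA
  rw [show (fun (stranded : List (String × Int × Int)) (col_idx : Nat) =>
      if (board.getD i []).getD col_idx 0 = 0 then stranded
      else
        if pvCanFormGroup board i col_idx && !pvCanFormRun board i col_idx then
          stranded ++ [("group_only", (i : Int), (col_idx : Int))]
        else stranded)
    = (fun (stranded : List (String × Int × Int)) (j : Nat) =>
        if pvCellA board i j then stranded ++ [("group_only", (i : Int), (j : Int))] else stranded) from by
    funext st j
    by_cases hz : (board.getD i []).getD j 0 = 0
    · have hc : pvCellA board i j = false := by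
        unfold pvCellA
        rw [decide_eq_false (by simpa using hz)]
        rfl
      rw [if_pos hz, hc]
      rfl
    · have h1 : decide ((board.getD i []).getD j 0 ≠ 0) = true := decide_eq_true hz
      rw [if_neg hz]
      unfold pvCellA
      rw [h1, Bool.true_and]]
  exact PySem.List.foldl_append_if _ _ _ _

theorem pvA_flat (board : List (List Int)) :
    find_stranded_tiles board = (List.range board.length).flatMap (pvRowA board) := by
  unfold find_stranded_tiles
  rw [PySem.List.foldl_congr_mem _ _ (fun st i => st ++ pvRowA board i) _
        (fun st i _ => pvA_inner board i st)]
  rw [PySem.List.foldl_append_eq_flatMap]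
  simp

theorem pvB_inner (board : List (List Int)) (row : List Int) (iv : Int)
    (st : List (String × Int × Int)) :
    (PySem.List.enumerate row 0).foldl (fun result q =>
      if q.2 = 0 then result
      else
        if 3 ≤ PySem.List.pyGetD (pvColCounts board) q.1 0 ∧
            (if 1 ≤ q.1 then PySem.List.pyGetD (pvStreaks 0 row) (q.1 - 1) 0 else 0)
              + (if q.1 + 1 < (row.length : Int) then
                  PySem.List.pyGetD ((pvStreaks 0 row.reverse).reverse) (q.1 + 1) 0 else 0) < 2 then
          result ++ [("group_only", iv, q.1)]
        else result) st
    = st ++ pvRowB board (iv, row) := by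
  unfold pvRowB
  rw [show (fun (result : List (String × Int × Int)) (q : Int × Int) =>
      if q.2 = 0 then result
      else
        if 3 ≤ PySem.List.pyGetD (pvColCounts board) q.1 0 ∧
            (if 1 ≤ q.1 then PySem.List.pyGetD (pvStreaks 0 row) (q.1 - 1) 0 else 0)
              + (if q.1 + 1 < (row.length : Int) then
                  PySem.List.pyGetD ((pvStreaks 0 row.reverse).reverse) (q.1 + 1) 0 else 0) < 2 then
          result ++ [("group_only", iv, q.1)]
        else result)
    = (fun (result : List (String × Int × Int)) (q : Int × Int) =>
        if pvCellB board row q then result ++ [("group_only", iv, q.1)] else result) from by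
    funext st q
    by_cases hz : q.2 = 0
    · have hc : pvCellB board row q = false := by
        unfold pvCellB
        rw [decide_eq_false (by simpa using hz)]
        rfl
      rw [if_pos hz, hc]
      rfl
    · have h1 : decide (q.2 ≠ 0) = true := decide_eq_true hz
      rw [if_neg hz]
      unfold pvCellB
      rw [h1, Bool.true_and]
      by_cases hc : 3 ≤ PySem.List.pyGetD (pvColCounts board) q.1 0 ∧
          (if 1 ≤ q.1 then PySem.List.pyGetD (pvStreaks 0 row) (q.1 - 1) 0 else 0)
            + (if q.1 + 1 < (row.length : Int) then
                PySem.List.pyGetD ((pvStreaks 0 row.reverse).reverse) (q.1 + 1) 0 else 0) < 2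
      · rw [if_pos hc, if_pos (decide_eq_true hc)]
      · rw [if_neg hc, if_neg (by simpa using hc)]]
  exact PySem.List.foldl_append_if _ _ _ _

theorem pvB_flat (board : List (List Int)) :
    find_stranded_tiles_alt board = (PySem.List.enumerate board 0).flatMap (pvRowB board) := by
  unfold find_stranded_tiles_alt
  rw [PySem.List.foldl_congr_mem _ _ (fun st p => st ++ pvRowB board p) _
        (fun st p _ => pvB_inner board p.2 p.1 st)]
  rw [PySem.List.foldl_append_eq_flatMap]
  simp

theorem pvRow_eq (board : List (List Int)) (i : Nat) (hi : i < board.length) :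
    pvRowA board i = pvRowB board ((i : Int), board.getD i []) := by
  unfold pvRowA pvRowB
  dsimp only
  rw [PySem.List.enumerate_eq_map_pyRange (board.getD i []) 0, PySem.List.len_eq,
      PySem.List.pyRange_zero_natCast, List.map_map, List.filter_map, List.map_map]
  have hf : List.filter
        (pvCellB board (board.getD i []) ∘ (fun j => (j, PySem.List.pyGetD (board.getD i []) j 0))
          ∘ (fun (k : Nat) => (k : Int))) (List.range (board.getD i []).length)
      = List.filter (fun j => pvCellA board i j) (List.range (board.getD i []).length) := by
    apply List.filter_congr
    intro j hj
    have hjlt : j < (board.getD i []).length := List.mem_range.mp hj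
    simp only [Function.comp]
    rw [PySem.List.pyGetD_natCast]
    exact (pvCell_eq board i j hi hjlt).symm
  rw [hf]
  apply List.map_congr_left
  intro j hj
  rfl

theorem ports_agree (board : List (List Int)) :
    find_stranded_tiles board = find_stranded_tiles_alt board := by
  rw [pvA_flat, pvB_flat]
  rw [PySem.List.enumerate_eq_map_pyRange board [], PySem.List.len_eq,
      PySem.List.pyRange_zero_natCast, List.map_map, List.flatMap_map]
  rw [List.flatMap_def, List.flatMap_def]
  congr 1
  apply List.map_congr_left
  intro i hi
  have hilt : i < board.length := List.mem_range.mp hi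
  show pvRowA board i = pvRowB board ((fun j => ((j : Int), PySem.List.pyGetD board j [])) ((i : Int)))
  rw [show ((fun j => ((j : Int), PySem.List.pyGetD board j [])) ((i : Int)))
        = ((i : Int), board.getD i []) from by dsimp only; rw [PySem.List.pyGetD_natCast]]
  exact pvRow_eq board i hilt

-- ===== VERDICT (by name: the statement is the Claim_ definition above) =====
theorem find_stranded_tiles_spec : Claim_equal_find_stranded_tiles := by
  intro board _ _
  unfold Spec_find_stranded_tiles
  exact ports_agree board
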